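-- pv_equiv track=rewrite | github.com/dblclik/advent-of-code-2023 | advent_of_code_2023/helpers/sequences.py | reduce_deltas_to_zeroes
-- ===== SOURCE A (Python) =====
-- from typing import List
--
-- def reduce_deltas_to_zeroes(input_sequence: List[int]):
--     sequences = []
--     sequences.append(input_sequence)
--     while not all([s == 0 for s in sequences[-1]]):
--         next_sequence = [
--             sequences[-1][ind + 1] - sequences[-1][ind]
--             for ind in range(len(sequences[-1]) - 1)
--         ]
--         sequences.append(next_sequence)
--
--     return sequences
-- ===== SOURCE B (Python) =====
-- from typing import List
--
-- def reduce_deltas_to_zeroes(input_sequence: List[int]):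
--     if all(s == 0 for s in input_sequence):
--         return [input_sequence]
--     deltas = [b - a for a, b in zip(input_sequence, input_sequence[1:])]
--     return [input_sequence] + reduce_deltas_to_zeroes(deltas)
-- ===== Notes on version B (the rewrite author's own statement) =====
-- stated objective: simpler
-- what changed: Replaces the iterative while-loop that keeps the whole table and re-indexes the last row by a direct structural recursion: base case returns [input_sequence] when all entries are zero, otherwise cons the row onto the recursion over its zip-built delta row.
import Mathlib
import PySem

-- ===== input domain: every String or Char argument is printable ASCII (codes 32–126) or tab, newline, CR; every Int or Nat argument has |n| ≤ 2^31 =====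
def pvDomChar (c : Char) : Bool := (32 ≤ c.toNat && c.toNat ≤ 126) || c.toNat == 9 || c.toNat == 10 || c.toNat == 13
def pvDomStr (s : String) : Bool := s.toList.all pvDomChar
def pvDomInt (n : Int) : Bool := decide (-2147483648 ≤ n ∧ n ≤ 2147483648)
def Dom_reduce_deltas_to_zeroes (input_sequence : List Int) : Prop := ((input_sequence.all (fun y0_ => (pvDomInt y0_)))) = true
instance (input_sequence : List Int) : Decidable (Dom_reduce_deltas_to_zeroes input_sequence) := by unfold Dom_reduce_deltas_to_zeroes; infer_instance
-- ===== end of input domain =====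

-- B replaces A's while-loop over a growing table (re-indexing the last row) by a direct
-- structural recursion consing each row onto the recursion over its zip-built delta row (objective: simpler).

-- ===== PORT A =====
-- next_sequence = [last[ind+1] - last[ind] for ind in range(len(last) - 1)]
def pvDeltasA (row : List Int) : List Int :=
  (PySem.List.pyRange 0 ((row.length : Int) - 1) 1).map
    (fun ind => PySem.List.pyGetD row (ind + 1) 0 - PySem.List.pyGetD row ind 0)

theorem pvDeltasA_length_lt (row : List Int) (h : row ≠ []) :
    (pvDeltasA row).length < row.length := by
  have : 0 < row.length := List.length_pos_iff.mpr h
  simp [pvDeltasA, PySem.List.length_pyRange_one]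
  omega

-- the while loop of A, carrying the table `sequences` (whose last row is `cur`)
def pvLoopA (sequences : List (List Int)) (cur : List Int) : List (List Int) :=
  if cur.all (fun s => s == 0) then sequences
  else pvLoopA (sequences ++ [pvDeltasA cur]) (pvDeltasA cur)
termination_by cur.length
decreasing_by
  exact pvDeltasA_length_lt cur (by rintro rfl; simp at *)

def reduce_deltas_to_zeroes (input_sequence : List Int) : List (List Int) :=
  pvLoopA [input_sequence] input_sequence

-- ===== PORT B =====
-- deltas = [b - a for a, b in zip(s, s[1:])]
def pvDeltasB (s : List Int) : List Int :=
  List.zipWith (fun a b => b - a) s (PySem.List.slice s (some 1) none)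

theorem pvDeltasB_length_lt (s : List Int) (h : s ≠ []) :
    (pvDeltasB s).length < s.length := by
  have : 0 < s.length := List.length_pos_iff.mpr h
  simp [pvDeltasB, PySem.List.slice_from_one]
  omega

def reduce_deltas_to_zeroes_alt (input_sequence : List Int) : List (List Int) :=
  if input_sequence.all (fun s => s == 0) then [input_sequence]
  else input_sequence :: reduce_deltas_to_zeroes_alt (pvDeltasB input_sequence)
termination_by input_sequence.length
decreasing_by
  exact pvDeltasB_length_lt input_sequence (by rintro rfl; simp at *)

-- ===== PRECONDITION & SPEC =====
def Spec_reduce_deltas_to_zeroes (input_sequence : List Int) (out : List (List Int)) : Prop := out = reduce_deltas_to_zeroes_alt input_sequence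
instance (input_sequence : List Int) (out : List (List Int)) : Decidable (Spec_reduce_deltas_to_zeroes input_sequence out) := by unfold Spec_reduce_deltas_to_zeroes; infer_instance

-- ===== CLAIM (what is proved, stated in full; the proofs are below) =====
def Claim_equal_reduce_deltas_to_zeroes : Prop := ∀ (input_sequence : List Int), Dom_reduce_deltas_to_zeroes input_sequence → Spec_reduce_deltas_to_zeroes input_sequence (reduce_deltas_to_zeroes input_sequence)

-- ===== LEMMAS AND PROOFS =====

-- the two delta-row computations agree
theorem pvDeltas_eq (row : List Int) : pvDeltasA row = pvDeltasB row := by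
  apply List.ext_getElem
  · simp [pvDeltasA, pvDeltasB, PySem.List.length_pyRange_one, PySem.List.slice_from_one]
  · intro i h1 h2
    have hi : i < row.length - 1 := by
      simpa [pvDeltasA, PySem.List.length_pyRange_one] using h1
    simp [pvDeltasA, pvDeltasB, PySem.List.slice_from_one, PySem.List.pyRange_one]
    have h1' : ((i : Int) + 1) = ((i + 1 : Nat) : Int) := by push_cast; ring
    rw [h1', PySem.List.pyGetD_natCast]
    simp [List.getD_eq_getElem?_getD,
      List.getElem?_eq_getElem (by omega : i + 1 < row.length),
      List.getElem?_eq_getElem (by omega : i < row.length)]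

theorem pvLoopA_eq (cur : List Int) (pre : List (List Int)) :
    pvLoopA (pre ++ [cur]) cur = pre ++ reduce_deltas_to_zeroes_alt cur := by
  rw [pvLoopA, reduce_deltas_to_zeroes_alt]
  split
  · simp
  · rw [pvDeltas_eq]
    have := pvLoopA_eq (pvDeltasB cur) (pre ++ [cur])
    simpa using this
termination_by cur.length
decreasing_by
  exact pvDeltasB_length_lt cur (by rintro rfl; simp at *)

-- ===== VERDICT (by name: the statement is the Claim_ definition above) =====
theorem reduce_deltas_to_zeroes_spec : Claim_equal_reduce_deltas_to_zeroes := by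
  intro xs _
  show reduce_deltas_to_zeroes xs = reduce_deltas_to_zeroes_alt xs
  simpa using pvLoopA_eq xs []
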